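-- pv_equiv track=rewrite | github.com/Laplx/ARC | NVARC-main/SDG/scripts/make_pairs.py | validate_grids
-- ===== SOURCE A (Python) =====
-- Grid = list[list[int]]
--
-- def validate_grids(grids: list[Grid]) -> bool:
--     unique_colors = set()
--     first_grid = grids[0]
--     num_equal_grids = 0
--     for grid in grids:
--         if grid == first_grid:
--             num_equal_grids += 1
--         if len(grid) < 1 or len(grid) > 30:
--             return False
--         for row in grid:
--             if len(row) < 1 or len(row) > 30:
--                 return False
--             unique_colors.update(row)
--     if num_equal_grids == len(grids):
--         # Prefer to use different grids
--         return False
--     if len(unique_colors) == 1: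
--         # Prefer to use different colors
--         return False
--     return True
-- ===== SOURCE B (Python) =====
-- def validate_grids(grids):
--     first_grid = grids[0]
--     if any(len(g) < 1 or len(g) > 30 or
--            any(len(r) < 1 or len(r) > 30 for r in g)
--            for g in grids):
--         return False
--     # Dimensions are valid, so the first cell exists; a second color exists
--     # iff some cell differs from it -- no set is ever built.
--     c0 = first_grid[0][0]
--     return (any(g != first_grid for g in grids[1:])
--             and any(c != c0 for g in grids for r in g for c in r))
-- ===== Notes on version B (the rewrite author's own statement) =====
-- stated objective: alternative
-- what changed: B never builds a color set or an equality counter: after a declarative dimension check it decides 'only one color' by comparing every cell against the first cell grids[0][0][0] (which the dimension check guarantees exists), and 'all grids equal' by an any() over grids[1:] against the first grid.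
import Mathlib
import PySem

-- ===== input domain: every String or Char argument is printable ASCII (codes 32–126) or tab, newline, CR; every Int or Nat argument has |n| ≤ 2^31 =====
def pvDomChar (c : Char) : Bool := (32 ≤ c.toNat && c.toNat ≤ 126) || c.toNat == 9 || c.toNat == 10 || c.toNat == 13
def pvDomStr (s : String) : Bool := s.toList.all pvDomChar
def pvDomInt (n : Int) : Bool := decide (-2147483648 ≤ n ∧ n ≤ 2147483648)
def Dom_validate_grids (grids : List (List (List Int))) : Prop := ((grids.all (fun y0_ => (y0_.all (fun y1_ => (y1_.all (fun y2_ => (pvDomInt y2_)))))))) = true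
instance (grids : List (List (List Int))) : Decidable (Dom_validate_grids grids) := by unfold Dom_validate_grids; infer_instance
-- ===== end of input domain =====

-- B drops A's color set and equality counter: after a declarative dimension check it tests
-- monochromaticity by comparing every cell to the first cell (which valid dimensions guarantee
-- exists) and grid-diversity by an any() over the tail; objective: alternative (O(1) extra space).


-- ===== PORT A =====
-- inner 'for row in grid' loop: none = early 'return False'
def rowLoopA : List (List Int) → PySem.Set Int → Option (PySem.Set Int)
  | [], colors => some colors
  | r :: rs, colors =>
    if r.length < 1 ∨ 30 < r.length then none
    else rowLoopA rs (PySem.Set.update colors r)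

-- outer 'for grid in grids' loop: state = (unique_colors, num_equal_grids); none = early 'return False'
def gridLoopA : List (List (List Int)) → List (List Int) → PySem.Set Int → Int → Option (PySem.Set Int × Int)
  | [], _, colors, numEq => some (colors, numEq)
  | g :: gs, first, colors, numEq =>
    let numEq' := if g == first then numEq + 1 else numEq
    if g.length < 1 ∨ 30 < g.length then none
    else match rowLoopA g colors with
      | none => none
      | some colors' => gridLoopA gs first colors' numEq'

def validate_grids (grids : List (List (List Int))) : Bool :=
  match grids with
  | [] => false   -- grids[0] raises IndexError in Python; excluded by Pre_
  | first :: _ =>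
    match gridLoopA grids first PySem.Set.empty 0 with
    | none => false
    | some (colors, numEq) =>
      if numEq = (grids.length : Int) then false
      else if PySem.Set.len colors = 1 then false
      else true

-- ===== PORT B =====
def badDimB (g : List (List Int)) : Bool :=
  decide (g.length < 1) || decide (30 < g.length) ||
    g.any (fun r => decide (r.length < 1) || decide (30 < r.length))

def validate_grids_alt (grids : List (List (List Int))) : Bool :=
  match grids with
  | [] => false   -- grids[0] raises IndexError in Python; excluded by Pre_
  | first :: rest =>
    if (first :: rest).any badDimB then false
    else
      match first, first with
      | [], _ | (_ :: _), [] => false            -- unreachable: dims valid ⇒ first grid nonempty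
      | _, r0 :: _ =>
        match r0 with
        | [] => false                            -- unreachable: dims valid ⇒ first row nonempty
        | c0 :: _ =>                             -- c0 = first_grid[0][0]
          (rest.any (fun g => g != first)) &&
            ((first :: rest).any (fun g => g.any (fun r => r.any (fun c => c != c0))))

-- ===== PRECONDITION & SPEC =====
-- grids[0] raises IndexError on the empty list (in A and in B alike)
def Pre_validate_grids (grids : List (List (List Int))) : Prop := grids ≠ []
instance (grids : List (List (List Int))) : Decidable (Pre_validate_grids grids) := by unfold Pre_validate_grids; infer_instance
def pvWitness_validate_grids : List (List (List Int)) := [[[0]], [[1]]]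

def Spec_validate_grids (grids : List (List (List Int))) (out : Bool) : Prop := out = validate_grids_alt grids
instance (grids : List (List (List Int))) (out : Bool) : Decidable (Spec_validate_grids grids out) := by unfold Spec_validate_grids; infer_instance

-- ===== CLAIM (what is proved, stated in full; the proofs are below) =====
def Claim_equal_validate_grids : Prop := ∀ (grids : List (List (List Int))), Dom_validate_grids grids → Pre_validate_grids grids → Spec_validate_grids grids (validate_grids grids)

-- ===== LEMMAS AND PROOFS =====
theorem set_update_append (c : PySem.Set Int) (xs ys : List Int) :
    PySem.Set.update c (xs ++ ys) = PySem.Set.update (PySem.Set.update c xs) ys := by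
  simp [PySem.Set.update, List.foldl_append]

theorem rowLoopA_char (rs : List (List Int)) (c : PySem.Set Int) :
    rowLoopA rs c =
      if rs.all (fun r => !(decide (r.length < 1) || decide (30 < r.length)))
      then some (PySem.Set.update c (rs.flatMap (fun r => r))) else none := by
  induction rs generalizing c with
  | nil => simp [rowLoopA, PySem.Set.update]
  | cons r rs ih =>
    simp only [rowLoopA, List.all_cons, List.flatMap_cons]
    by_cases h : r.length < 1 ∨ 30 < r.length
    · have hb : (!(decide (r.length < 1) || decide (30 < r.length))) = false := by
        rcases h with h | h <;> simp [h]
      rw [if_pos h, hb]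
      simp
    · have h1 : (!(decide (r.length < 1) || decide (30 < r.length))) = true := by
        obtain ⟨ha, hb⟩ := not_or.mp h
        simp [ha, hb]
      rw [if_neg h, ih, h1, set_update_append]
      simp

theorem gridLoopA_char (gs : List (List (List Int))) (first : List (List Int))
    (c : PySem.Set Int) (n : Int) :
    gridLoopA gs first c n =
      if gs.all (fun g => !badDimB g)
      then some (PySem.Set.update c (gs.flatMap (fun g => g.flatMap (fun r => r))),
                 n + (gs.countP (fun g => g == first) : Int))
      else none := by
  induction gs generalizing c n with
  | nil => simp [gridLoopA, PySem.Set.update]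
  | cons g gs ih =>
    simp only [gridLoopA, List.all_cons, List.flatMap_cons, rowLoopA_char]
    by_cases h : g.length < 1 ∨ 30 < g.length
    · have hb : badDimB g = true := by
        unfold badDimB
        rcases h with h | h <;> simp [h]
      rw [if_pos h]
      simp [hb]
    · by_cases h2 : (g.all (fun r => !(decide (r.length < 1) || decide (30 < r.length)))) = true
      · have hd : (!badDimB g) = true := by
          unfold badDimB
          simp only [Bool.not_eq_true', Bool.or_eq_false_iff, decide_eq_false_iff_not]
          refine ⟨⟨by omega, by omega⟩, ?_⟩
          simp only [List.any_eq_false]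
          intro r hr
          have := (List.all_eq_true.mp h2) r hr
          simpa using this
        rw [if_neg h, if_pos h2]
        dsimp only
        rw [ih, set_update_append]
        simp only [hd, Bool.true_and, List.countP_cons]
        split_ifs with hall he
        · simp only [Option.some.injEq, Prod.mk.injEq, true_and]
          push_cast; ring
        · simp only [Option.some.injEq, Prod.mk.injEq, true_and]
          simp
        · rfl
      · have hb : badDimB g = true := by
          unfold badDimB
          simp only [Bool.or_eq_true, List.any_eq_true]
          right
          obtain ⟨r, hr, hbad⟩ := by
            simpa only [List.all_eq_true, not_forall] using h2
          refine ⟨r, hr, ?_⟩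
          have h3 : r.length < 1 ∨ 30 < r.length := by
            by_contra hc
            obtain ⟨ha, hb⟩ := not_or.mp hc
            exact hbad (by simp [ha, hb])
          rcases h3 with h3 | h3 <;> simp [h3]
        rw [if_neg h, if_neg h2]
        simp [hb]

theorem countP_eq_length_iff_all {α : Type} (p : α → Bool) (l : List α) :
    (l.countP p = l.length) ↔ l.all p := by
  rw [List.all_eq_true]
  exact List.countP_eq_length

theorem update_empty_eq_ofList (xs : List Int) :
    PySem.Set.update PySem.Set.empty xs = PySem.Set.ofList xs := by
  simp [PySem.Set.update, PySem.Set.ofList_eq_foldl, PySem.Set.empty]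

theorem foldl_add_const (a : Int) (t : List Int) (h : ∀ x ∈ t, x = a) :
    t.foldl PySem.Set.add [a] = [a] := by
  induction t with
  | nil => rfl
  | cons x xs ih =>
    rw [h x (by simp)] at *
    have : PySem.Set.add [a] a = [a] := by
      simp [PySem.Set.add, PySem.Set.contains]
    simp only [List.foldl_cons, this]
    exact ih (fun y hy => h y (by simp [hy]))

theorem len_ofList_cons_eq_one_iff (a : Int) (t : List Int) :
    PySem.Set.len (PySem.Set.ofList (a :: t)) = 1 ↔ ∀ x ∈ t, x = a := by
  constructor
  · intro h
    have hnd := PySem.Set.nodup_ofList (a :: t)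
    have h' : (PySem.Set.ofList (a :: t)).length = 1 := by
      simpa [PySem.Set.len] using h
    obtain ⟨b, hb⟩ := List.length_eq_one_iff.mp h'
    have ha : a ∈ PySem.Set.ofList (a :: t) := by
      rw [PySem.Set.mem_ofList]; simp
    rw [hb] at ha
    simp at ha
    intro x hx
    have hxm : x ∈ PySem.Set.ofList (a :: t) := by
      rw [PySem.Set.mem_ofList]; simp [hx]
    rw [hb] at hxm
    simp at hxm
    rw [hxm, ha]
  · intro h
    have : PySem.Set.ofList (a :: t) = [a] := by
      rw [PySem.Set.ofList_eq_foldl]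
      simp only [List.foldl_cons]
      have : PySem.Set.add [] a = [a] := by rfl
      rw [this]
      exact foldl_add_const a t h
    rw [this]
    rfl

-- ===== VERDICT (by name: the statement is the Claim_ definition above) =====
theorem validate_grids_spec : Claim_equal_validate_grids := by
  intro grids _ hpre
  unfold Spec_validate_grids
  cases grids with
  | nil => exact absurd rfl hpre
  | cons first rest =>
    simp only [validate_grids, validate_grids_alt, gridLoopA_char]
    by_cases hd : ((first :: rest).all (fun g => !badDimB g)) = true
    · have hany : ((first :: rest).any badDimB) = false := by
        simp only [List.any_eq_false]
        intro g hg
        have := (List.all_eq_true.mp hd) g hg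
        simpa using this
      rw [if_pos hd, hany]
      simp only [Bool.false_eq_true, if_false]
      -- dims valid ⇒ first grid and its first row are nonempty
      have hfirst : (!badDimB first) = true := (List.all_eq_true.mp hd) first (by simp)
      unfold badDimB at hfirst
      simp only [Bool.not_eq_true', Bool.or_eq_false_iff, decide_eq_false_iff_not,
        List.any_eq_false] at hfirst
      obtain ⟨⟨hlen1, _⟩, hrows⟩ := hfirst
      match hf : first with
      | [] => simp at hlen1
      | r0 :: rtl =>
        have hr0 : ¬(r0.length < 1 ∨ 30 < r0.length) := by
          have := hrows r0 (by simp)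
          simp only [Bool.or_eq_true, decide_eq_true_eq] at this
          exact this
        match hr : r0 with
        | [] => simp at hr0
        | c0 :: ctl =>
          dsimp only
          rw [update_empty_eq_ofList]
          -- numEq = len(grids) ↔ all grids equal first ↔ ¬ any in rest differs
          have hle := List.countP_le_length (p := fun g => g == (c0 :: ctl) :: rtl)
            (l := ((c0 :: ctl) :: rtl) :: rest)
          have hcnt : (0 + ((((c0 :: ctl) :: rtl) :: rest).countP
                (fun g => g == (c0 :: ctl) :: rtl) : Int)
              = ((((c0 :: ctl) :: rtl) :: rest).length : Int))
              ↔ ((((c0 :: ctl) :: rtl) :: rest).all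
                (fun g => g == (c0 :: ctl) :: rtl)) = true := by
            rw [← countP_eq_length_iff_all]
            omega
          -- the flattened cell list starts with c0
          have hcells : (((((c0 :: ctl) :: rtl) :: rest)).flatMap
              (fun g => g.flatMap (fun r => r)))
              = c0 :: (ctl ++ rtl.flatMap (fun r => r)
                  ++ rest.flatMap (fun g => g.flatMap (fun r => r))) := by
            simp
          rw [hcells]
          by_cases he : ((((c0 :: ctl) :: rtl) :: rest).all
              (fun g => g == (c0 :: ctl) :: rtl)) = true
          · rw [if_pos (hcnt.mpr he)]
        -- B: rest.any (g ≠ first) = false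
            have : (rest.any (fun g => g != (c0 :: ctl) :: rtl)) = false := by
              simp only [List.any_eq_false]
              intro g hg
              have := (List.all_eq_true.mp he) g (by simp [hg])
              simpa using this
            rw [this]
            simp
          · rw [if_neg (fun h => he (hcnt.mp h))]
            have hanyne : (rest.any (fun g => g != (c0 :: ctl) :: rtl)) = true := by
              obtain ⟨g, hg, hne⟩ := by
                simpa only [List.all_eq_true, not_forall] using he
              rcases (by simpa using hg : g = (c0 :: ctl) :: rtl ∨ g ∈ rest) with h1 | h1
              · exact absurd (by simp [h1]) hne
              · simp only [List.any_eq_true]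
                exact ⟨g, h1, by simpa using hne⟩
            rw [hanyne, Bool.true_and]
            -- len(colors) = 1 ↔ every cell equals c0 ↔ ¬ any cell differs
            by_cases hm : ∀ x ∈ (ctl ++ rtl.flatMap (fun r => r)
                ++ rest.flatMap (fun g => g.flatMap (fun r => r))), x = c0
            · rw [if_pos ((len_ofList_cons_eq_one_iff _ _).mpr hm)]
              have : ((((c0 :: ctl) :: rtl) :: rest).any
                  (fun g => g.any (fun r => r.any (fun c => c != c0)))) = false := by
                rw [Bool.eq_false_iff]
                intro h2
                simp only [List.any_eq_true] at h2
                obtain ⟨g, hg, r, hr, c, hc, hne⟩ := h2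
                have hceq : c = c0 := by
                  rcases (by simpa using hg : g = (c0 :: ctl) :: rtl ∨ g ∈ rest) with h1 | h1
                  · subst h1
                    rcases (by simpa using hr : r = c0 :: ctl ∨ r ∈ rtl) with h2 | h2
                    · subst h2
                      rcases (by simpa using hc : c = c0 ∨ c ∈ ctl) with h3 | h3
                      · exact h3
                      · exact hm c (by simp [h3])
                    · refine hm c ?_
                      simp only [List.mem_append, List.mem_flatMap]
                      exact Or.inl (Or.inr ⟨r, h2, hc⟩)
                  · refine hm c ?_
                    simp only [List.mem_append, List.mem_flatMap]
                    exact Or.inr ⟨g, h1, r, hr, hc⟩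
                simp [hceq] at hne
              rw [this]
            · rw [if_neg (fun h => hm ((len_ofList_cons_eq_one_iff _ _).mp h))]
              obtain ⟨x, hx, hxne⟩ := by simpa only [not_forall] using hm
              have : ((((c0 :: ctl) :: rtl) :: rest).any
                  (fun g => g.any (fun r => r.any (fun c => c != c0)))) = true := by
                simp only [List.any_eq_true]
                simp only [List.mem_append, List.mem_flatMap] at hx
                rcases hx with (h1 | ⟨r, hr, hc⟩) | ⟨g, hg, r, hr, hc⟩
                · exact ⟨(c0 :: ctl) :: rtl, by simp, c0 :: ctl, by simp,
                    x, by simp [h1], by simpa using hxne⟩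
                · exact ⟨(c0 :: ctl) :: rtl, by simp, r, by simp [hr],
                    x, hc, by simpa using hxne⟩
                · exact ⟨g, by simp [hg], r, hr, x, hc, by simpa using hxne⟩
              rw [this]
    · have hany : ((first :: rest).any badDimB) = true := by
        obtain ⟨g, hg, hb⟩ := by
          simpa only [List.all_eq_true, not_forall] using hd
        simp only [List.any_eq_true]
        exact ⟨g, hg, by simpa using hb⟩
      rw [if_neg hd, hany]
      simp
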